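-- pv_equiv track=rewrite | github.com/seung-00/stock_machine | python_scripts/news_parser.py | GetCompanyFromNews
-- ===== SOURCE A (Python) =====
-- def company_in_news(news,CompanyList):
--     result = "None"
--     for i in CompanyList:
--         if (i in news): #한화, 한화투자운용 구분위함
--             if(result =="None"):
--                 result = str(i)
--             else:
--                 if(len(result)<len(str(i))):
--                     result = str(i)
--     return result
--
-- def GetCompanyFromNews(headlines, CompanyList):
--     CompanyFromNews = []
--     for news in headlines:
--         Company = company_in_news(news,CompanyList)
--         if(Company == "None"):
--             CompanyFromNews.append('-')
--         else:
--             CompanyFromNews.append(Company)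
--     return CompanyFromNews
-- ===== SOURCE B (Python) =====
-- def GetCompanyFromNews(headlines, CompanyList):
--     # Loop-interchanged scan: one pass over CompanyList updating a per-headline
--     # Optional best-match slot; no string sentinel.
--     best = [None] * len(headlines)
--     for c in CompanyList:
--         best = [c if (c in news and (b is None or len(b) < len(c))) else b
--                 for b, news in zip(best, headlines)]
--     return ['-' if b is None else b for b in best]
-- ===== Notes on version B (the rewrite author's own statement) =====
-- stated objective: alternative
-- what changed: B interchanges the loops: one pass over CompanyList updates a per-headline array of Optional best matches pointwise (zip with headlines), instead of re-scanning the whole company list per headline with a 'None'-string sentinel.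
-- intended difference: On inputs where CompanyList contains the literal string 'None' and some headline contains it, A's 'None' sentinel collides with that company: A reports '-' or lets a later shorter company overwrite the match, while B returns the genuine longest matching company, which is the intended tag. — e.g. on GetCompanyFromNews(["None"], ["None"]): A returns ["-"], B returns ["None"]
import Mathlib
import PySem

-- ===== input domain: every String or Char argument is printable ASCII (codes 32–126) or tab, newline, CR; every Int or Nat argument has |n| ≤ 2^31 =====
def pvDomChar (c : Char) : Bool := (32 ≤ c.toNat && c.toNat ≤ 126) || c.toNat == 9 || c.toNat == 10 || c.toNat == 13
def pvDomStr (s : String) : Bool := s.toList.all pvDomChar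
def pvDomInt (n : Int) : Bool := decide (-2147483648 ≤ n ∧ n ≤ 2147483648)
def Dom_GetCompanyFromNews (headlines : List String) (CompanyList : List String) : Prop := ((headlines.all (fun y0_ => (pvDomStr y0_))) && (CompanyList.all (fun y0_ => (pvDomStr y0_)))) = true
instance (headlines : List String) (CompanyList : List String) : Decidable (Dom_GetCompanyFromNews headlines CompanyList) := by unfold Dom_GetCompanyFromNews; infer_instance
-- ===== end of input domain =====

-- B interchanges the loops: one pass over CompanyList updates a per-headline array of
-- Optional best matches pointwise, instead of A's per-headline rescan with a "None"-string
-- sentinel (objective: alternative, same asymptotic cost).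

-- ===== PORT A =====
def company_in_news (news : String) (CompanyList : List String) : String :=
  CompanyList.foldl
    (fun result i =>
      if PySem.Str.isIn i news then
        if result == "None" then i
        else if PySem.Str.len result < PySem.Str.len i then i else result
      else result)
    "None"

def GetCompanyFromNews (headlines : List String) (CompanyList : List String) : List String :=
  headlines.foldl
    (fun CompanyFromNews news =>
      let Company := company_in_news news CompanyList
      if Company == "None" then CompanyFromNews ++ ["-"] else CompanyFromNews ++ [Company])
    []

-- ===== PORT B =====
def GetCompanyFromNews_alt (headlines : List String) (CompanyList : List String) : List String :=
  let best :=
    CompanyList.foldl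
      (fun best c =>
        (best.zip headlines).map
          (fun bn =>
            if PySem.Str.isIn c bn.2 &&
                (match bn.1 with
                 | none => true
                 | some b => decide (PySem.Str.len b < PySem.Str.len c)) then
              some c
            else bn.1))
      (List.replicate headlines.length (none : Option String))
  best.map (fun b => match b with | none => "-" | some b => b)

-- ===== PRECONDITION & SPEC =====
-- On inputs where CompanyList contains the literal string "None" and some headline contains it,
-- A's "None" sentinel collides with that company: A reports "-" or lets a later shorter company
-- overwrite the match, while B returns the genuine longest matching company, the intended tag.
def D_GetCompanyFromNews (headlines : List String) (CompanyList : List String) : Prop :=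
  "None" ∈ CompanyList ∧ ∃ h ∈ headlines, PySem.Str.isIn "None" h = true
instance (headlines : List String) (CompanyList : List String) : Decidable (D_GetCompanyFromNews headlines CompanyList) := by unfold D_GetCompanyFromNews; infer_instance

def Spec_GetCompanyFromNews (headlines : List String) (CompanyList : List String) (out : List String) : Prop := ¬ D_GetCompanyFromNews headlines CompanyList → out = GetCompanyFromNews_alt headlines CompanyList
instance (headlines : List String) (CompanyList : List String) (out : List String) : Decidable (Spec_GetCompanyFromNews headlines CompanyList out) := by unfold Spec_GetCompanyFromNews; infer_instance

def pvDiffWitness_GetCompanyFromNews : List String × List String := (["None"], ["None"])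
def pvDiffWitnessOut_GetCompanyFromNews : (List String) × (List String) := (["-"], ["None"])

-- ===== CLAIM (what is proved, stated in full; the proofs are below) =====
def Claim_unchanged_GetCompanyFromNews : Prop := ∀ (headlines : List String) (CompanyList : List String), Dom_GetCompanyFromNews headlines CompanyList → Spec_GetCompanyFromNews headlines CompanyList (GetCompanyFromNews headlines CompanyList)
def Claim_changed_GetCompanyFromNews : Prop := Dom_GetCompanyFromNews (pvDiffWitness_GetCompanyFromNews.1) (pvDiffWitness_GetCompanyFromNews.2) ∧ D_GetCompanyFromNews (pvDiffWitness_GetCompanyFromNews.1) (pvDiffWitness_GetCompanyFromNews.2) ∧ GetCompanyFromNews (pvDiffWitness_GetCompanyFromNews.1) (pvDiffWitness_GetCompanyFromNews.2) = pvDiffWitnessOut_GetCompanyFromNews.1 ∧ GetCompanyFromNews_alt (pvDiffWitness_GetCompanyFromNews.1) (pvDiffWitness_GetCompanyFromNews.2) = pvDiffWitnessOut_GetCompanyFromNews.2 ∧ pvDiffWitnessOut_GetCompanyFromNews.1 ≠ pvDiffWitnessOut_GetCompanyFromNews.2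

-- ===== LEMMAS AND PROOFS =====

-- B's per-slot update for a single headline `news`.
def altStep (news : String) (b : Option String) (c : String) : Option String :=
  if PySem.Str.isIn c news &&
      (match b with
       | none => true
       | some b => decide (PySem.Str.len b < PySem.Str.len c)) then some c else b

-- A's inner-loop step for a single headline.
def aStep (news : String) (result : String) (i : String) : String :=
  if PySem.Str.isIn i news then
    if result == "None" then i
    else if PySem.Str.len result < PySem.Str.len i then i else result
  else result

-- When no company equal to "None" matches `news`, A's sentinel state machine tracks B's
-- Option-valued slot exactly ("None" ↔ none), and the slot never holds "None".
lemma altA_none (news c : String) :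
    aStep news "None" c = (match altStep news none c with | none => "None" | some r => r) := by
  unfold aStep altStep
  by_cases hin : PySem.Chars.isIn c.toList news.toList = true <;> simp [hin]

lemma altA_some (news c rb : String) (hrb : rb ≠ "None") :
    aStep news rb c = (match altStep news (some rb) c with | none => "None" | some r => r) := by
  have hrb' : (rb == "None") = false := by simpa using hrb
  unfold aStep altStep
  by_cases hin : PySem.Chars.isIn c.toList news.toList = true <;>
    by_cases hlt : rb.length < c.length <;>
      simp [hin, hlt, hrb']

lemma altKeep_none (news c : String) (hc : PySem.Str.isIn c news = true → c ≠ "None") :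
    ∀ r, altStep news none c = some r → r ≠ "None" := by
  intro r hr
  unfold altStep at hr
  by_cases hin : PySem.Chars.isIn c.toList news.toList = true <;> simp [hin] at hr
  subst hr
  exact hc (by simpa using hin)

lemma altKeep_some (news c rb : String) (hrb : rb ≠ "None")
    (hc : PySem.Str.isIn c news = true → c ≠ "None") :
    ∀ r, altStep news (some rb) c = some r → r ≠ "None" := by
  intro r hr
  unfold altStep at hr
  by_cases hin : PySem.Chars.isIn c.toList news.toList = true <;>
    by_cases hlt : rb.length < c.length <;>
      simp [hin, hlt] at hr <;>
        (subst hr;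
         first
           | exact hc (by simpa using hin)
           | exact hrb)

lemma aStep_corr (news : String) (cs : List String)
    (hno : ∀ c ∈ cs, PySem.Str.isIn c news = true → c ≠ "None") :
    ∀ b : Option String, (∀ r, b = some r → r ≠ "None") →
      cs.foldl (aStep news) (match b with | none => "None" | some r => r)
        = (match cs.foldl (altStep news) b with | none => "None" | some r => r)
      ∧ (∀ r, cs.foldl (altStep news) b = some r → r ≠ "None") := by
  induction cs with
  | nil => intro b hb; exact ⟨rfl, hb⟩
  | cons c cs ih =>
    intro b hb
    have hc : PySem.Str.isIn c news = true → c ≠ "None" := hno c (by simp)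
    have hno' : ∀ x ∈ cs, PySem.Str.isIn x news = true → x ≠ "None" := by
      intro x hx; exact hno x (by simp [hx])
    rw [List.foldl_cons, List.foldl_cons]
    rcases b with _ | rb
    · rw [show aStep news (match (none : Option String) with | none => "None" | some r => r) c
            = aStep news "None" c from rfl, altA_none news c]
      exact ih hno' _ (altKeep_none news c hc)
    · have hrb : rb ≠ "None" := hb rb rfl
      rw [show aStep news (match (some rb : Option String) with | none => "None" | some r => r) c
            = aStep news rb c from rfl, altA_some news c rb hrb]
      exact ih hno' _ (altKeep_some news c rb hrb hc)

lemma per_headline (news : String) (cs : List String)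
    (hno : ∀ c ∈ cs, PySem.Str.isIn c news = true → c ≠ "None") :
    (if company_in_news news cs == "None" then "-" else company_in_news news cs)
      = (match cs.foldl (altStep news) none with | none => "-" | some r => r) := by
  have h := aStep_corr news cs hno none (by simp)
  have h1 : company_in_news news cs
      = (match cs.foldl (altStep news) none with | none => "None" | some r => r) := by
    exact h.1
  rcases hres : cs.foldl (altStep news) none with _ | r
  · simp [h1, hres]
  · have hr' : (r == "None") = false := by simpa using h.2 r hres
    simp [h1, hres, hr']

-- B's company-fold acts pointwise: peel off the head headline/slot.
lemma fold_zip_cons (h : String) (t : List String) (b : Option String)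
    (bs : List (Option String)) (cs : List String) :
    cs.foldl (fun best c => ((best.zip (h :: t)).map
        (fun bn =>
          if PySem.Str.isIn c bn.2 &&
              (match bn.1 with
               | none => true
               | some x => decide (PySem.Str.len x < PySem.Str.len c)) then some c else bn.1)))
      (b :: bs)
      = cs.foldl (altStep h) b ::
        cs.foldl (fun best c => ((best.zip t).map
          (fun bn =>
            if PySem.Str.isIn c bn.2 &&
                (match bn.1 with
                 | none => true
                 | some x => decide (PySem.Str.len x < PySem.Str.len c)) then some c else bn.1))) bs := by
  induction cs generalizing b bs with
  | nil => rfl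
  | cons c cs ih =>
    rw [List.foldl_cons, List.foldl_cons, List.foldl_cons]
    have hhead : ((b :: bs).zip (h :: t)).map
        (fun bn =>
          if PySem.Str.isIn c bn.2 &&
              (match bn.1 with
               | none => true
               | some x => decide (PySem.Str.len x < PySem.Str.len c)) then some c else bn.1)
        = altStep h b c :: ((bs.zip t).map
          (fun bn =>
            if PySem.Str.isIn c bn.2 &&
                (match bn.1 with
                 | none => true
                 | some x => decide (PySem.Str.len x < PySem.Str.len c)) then some c else bn.1)) := by
      simp [altStep]
    rw [hhead]
    exact ih _ _

lemma alt_eq_map (hl : List String) (cs : List String) :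
    GetCompanyFromNews_alt hl cs
      = hl.map (fun news =>
          match cs.foldl (altStep news) none with | none => "-" | some r => r) := by
  induction hl with
  | nil =>
    show (cs.foldl _ (List.replicate (List.length ([] : List String)) none)).map _ = []
    induction cs with
    | nil => rfl
    | cons c cs ihc => simpa using ihc
  | cons h t ih =>
    unfold GetCompanyFromNews_alt
    rw [List.length_cons, List.replicate_succ, fold_zip_cons]
    simp only [List.map_cons, List.cons.injEq]
    exact ⟨trivial, ih⟩

lemma a_eq_map (hl : List String) (cs : List String) :
    GetCompanyFromNews hl cs
      = hl.map (fun news =>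
          if company_in_news news cs == "None" then "-" else company_in_news news cs) := by
  unfold GetCompanyFromNews
  have hstep : (fun (CompanyFromNews : List String) news =>
        let Company := company_in_news news cs
        if Company == "None" then CompanyFromNews ++ ["-"] else CompanyFromNews ++ [Company])
      = fun CompanyFromNews news => CompanyFromNews ++
          [if company_in_news news cs == "None" then "-" else company_in_news news cs] := by
    funext acc news
    by_cases hn : company_in_news news cs == "None" <;> simp [hn]
  rw [hstep, PySem.List.foldl_append_singleton_eq_map, List.nil_append]

-- ===== VERDICT (by name: the statement is the Claim_ definition above) =====
theorem GetCompanyFromNews_spec : Claim_unchanged_GetCompanyFromNews := by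
  intro hl cs _
  unfold Spec_GetCompanyFromNews
  intro hD
  unfold D_GetCompanyFromNews at hD
  rw [a_eq_map, alt_eq_map]
  apply List.map_congr_left
  intro news hmem
  apply per_headline
  intro c hcmem hcin hceq
  subst hceq
  exact hD ⟨hcmem, news, hmem, hcin⟩

theorem GetCompanyFromNews_changed : Claim_changed_GetCompanyFromNews := by
  unfold Claim_changed_GetCompanyFromNews; decide
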